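-- pv_equiv track=rewrite | github.com/irtaza780/technical_debt_findings | refactored_code_v2/DetectPalindromes_DefaultOrganization_20250911160644/palindrome_detector.py | _iter_words
-- ===== SOURCE A (Python) =====
-- from typing import List, Iterator, Tuple
--
-- def _iter_words(line: str) -> Iterator[Tuple[int, int]]:
--     """
--     Yield (start, end) spans for words within a line.
--
--     Words are contiguous alphanumeric sequences (Unicode-aware).
--
--     Args:
--         line: The line to scan for words
--
--     Yields:
--         Tuples of (start_position, end_position) for each word
--     """
--     line_length = len(line)
--     current_pos = 0
--
--     while current_pos < line_length:
--         # Skip non-alphanumeric characters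
--         while current_pos < line_length and not line[current_pos].isalnum():
--             current_pos += 1
--
--         if current_pos >= line_length:
--             break
--
--         word_start = current_pos
--
--         # Consume contiguous alphanumeric characters
--         while current_pos < line_length and line[current_pos].isalnum():
--             current_pos += 1
--
--         yield word_start, current_pos
-- ===== SOURCE B (Python) =====
-- def _iter_words(line):
--     """Yield (start, end) spans of contiguous alphanumeric runs: single pass with an in-word flag."""
--     start = None
--     for i, ch in enumerate(line):
--         if ch.isalnum():
--             if start is None:
--                 start = i
--         elif start is not None:
--             yield start, i
--             start = None
--     if start is not None:
--         yield start, len(line)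
-- ===== Notes on version B (the rewrite author's own statement) =====
-- stated objective: idiomatic
-- what changed: Replaced the nested while-loops with explicit index arithmetic by a single enumerate pass keeping an in-word start flag, flushing the trailing word after the loop.
import Mathlib
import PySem

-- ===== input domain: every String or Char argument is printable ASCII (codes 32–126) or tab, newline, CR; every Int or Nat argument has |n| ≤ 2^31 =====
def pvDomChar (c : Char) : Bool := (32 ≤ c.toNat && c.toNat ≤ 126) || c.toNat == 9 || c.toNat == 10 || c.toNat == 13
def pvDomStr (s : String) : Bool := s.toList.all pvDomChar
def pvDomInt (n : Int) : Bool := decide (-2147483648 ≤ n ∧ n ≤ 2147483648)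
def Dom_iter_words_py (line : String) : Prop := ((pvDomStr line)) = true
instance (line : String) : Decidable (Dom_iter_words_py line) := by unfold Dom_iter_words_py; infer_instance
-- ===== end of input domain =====

-- B replaces A's nested while-loops (skip non-alnum, then consume a word) by a single
-- enumerate pass with an in-word start flag, flushing the trailing word; same O(n) cost.


-- ===== PORT A =====
-- inner 'while … isalnum' loop: consume contiguous alphanumerics, returning (current_pos, rest)
def pvConsumeA (cs : List Char) (pos : Int) : Int × List Char :=
  match cs with
  | [] => (pos, [])
  | c :: rest => if PySem.Chars.isalnum c then pvConsumeA rest (pos + 1) else (pos, c :: rest)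

theorem pvConsumeA_length (cs : List Char) (pos : Int) : (pvConsumeA cs pos).2.length ≤ cs.length := by
  induction cs generalizing pos with
  | nil => simp [pvConsumeA]
  | cons c rest ih =>
    simp only [pvConsumeA]
    split
    · exact le_trans (ih _) (Nat.le_succ _)
    · simp

-- outer 'while current_pos < line_length' loop of A
def pvGoA (cs : List Char) (pos : Int) : List (Int × Int) :=
  match h : cs with
  | [] => []
  | c :: rest =>
    if PySem.Chars.isalnum c then
      -- word_start = pos; consume the word; yield; continue
      let p := pvConsumeA rest (pos + 1)
      (pos, p.1) :: pvGoA p.2 p.1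
    else
      -- skip a non-alphanumeric character
      pvGoA rest (pos + 1)
termination_by cs.length
decreasing_by
  · exact Nat.lt_succ_of_le (pvConsumeA_length rest (pos + 1))
  · simp

def iter_words_py (line : String) : List (Int × Int) := pvGoA line.toList 0

-- ===== PORT B =====
-- loop body of B's single pass: state = (accumulated spans, optional word start)
def pvStepB (s : List (Int × Int) × Option Int) (ic : Int × Char) : List (Int × Int) × Option Int :=
  if PySem.Chars.isalnum ic.2 then
    match s.2 with
    | none => (s.1, some ic.1)
    | some _ => s
  else
    match s.2 with
    | none => s
    | some st => (s.1 ++ [(st, ic.1)], none)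

-- single pass over enumerate(line) with the in-word flag, flushing the trailing word
def iter_words_py_alt (line : String) : List (Int × Int) :=
  let cs := line.toList
  let s := (PySem.List.enumerate cs 0).foldl pvStepB ([], none)
  match s.2 with
  | none => s.1
  | some st => s.1 ++ [(st, (cs.length : Int))]

-- ===== PRECONDITION & SPEC =====
def Spec_iter_words_py (line : String) (out : List (Int × Int)) : Prop := out = iter_words_py_alt line
instance (line : String) (out : List (Int × Int)) : Decidable (Spec_iter_words_py line out) := by unfold Spec_iter_words_py; infer_instance

-- ===== CLAIM (what is proved, stated in full; the proofs are below) =====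
def Claim_equal_iter_words_py : Prop := ∀ (line : String), Dom_iter_words_py line → Spec_iter_words_py line (iter_words_py line)

-- ===== LEMMAS AND PROOFS =====

-- B's fold+flush, as a recursion over the character suffix with its start index
def pvRunB (cs : List Char) (i : Int) (st : Option Int) (acc : List (Int × Int)) : List (Int × Int) :=
  match cs with
  | [] => match st with
          | none => acc
          | some s => acc ++ [(s, i)]
  | c :: rest =>
    if PySem.Chars.isalnum c then
      match st with
      | none => pvRunB rest (i + 1) (some i) acc
      | some _ => pvRunB rest (i + 1) st acc
    else
      match st with
      | none => pvRunB rest (i + 1) none acc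
      | some s => pvRunB rest (i + 1) none (acc ++ [(s, i)])

theorem pvRunB_eq_fold (cs : List Char) (i : Int) (st : Option Int) (acc : List (Int × Int)) :
    pvRunB cs i st acc =
      (match (PySem.List.enumerate cs i).foldl pvStepB (acc, st) with
      | (a, none) => a
      | (a, some s) => a ++ [(s, i + cs.length)]) := by
  induction cs generalizing i st acc with
  | nil =>
    cases st <;> simp [pvRunB, PySem.List.enumerate_nil]
  | cons c rest ih =>
    rw [PySem.List.enumerate_cons]
    simp only [List.foldl_cons]
    by_cases h : PySem.Chars.isalnum c = true <;> cases st <;>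
      simp [pvRunB, pvStepB, h, ih] <;> ring_nf

theorem pvRunB_acc (cs : List Char) (i : Int) (st : Option Int) (acc : List (Int × Int)) :
    pvRunB cs i st acc = acc ++ pvRunB cs i st [] := by
  induction cs generalizing i st acc with
  | nil => cases st <;> simp [pvRunB]
  | cons c rest ih =>
    by_cases h : PySem.Chars.isalnum c = true
    · cases st <;> simp only [pvRunB, h, ite_true] <;> exact ih ..
    · cases st <;> simp only [pvRunB, h, Bool.false_eq_true, ite_false]
      · exact ih ..
      · rw [ih]
        conv_rhs => rw [ih]
        simp

-- inside a word, B emits exactly the span A's consume-loop computes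
theorem pvRunB_some (cs : List Char) (i s : Int) :
    pvRunB cs i (some s) [] =
      (s, (pvConsumeA cs i).1) :: pvRunB (pvConsumeA cs i).2 (pvConsumeA cs i).1 none [] := by
  induction cs generalizing i with
  | nil => simp [pvRunB, pvConsumeA]
  | cons c rest ih =>
    by_cases h : PySem.Chars.isalnum c = true
    · simp only [pvRunB, pvConsumeA, h, ite_true]
      exact ih (i + 1)
    · simp only [pvRunB, pvConsumeA, h, Bool.false_eq_true, ite_false]
      rw [pvRunB_acc]
      simp

theorem pvGoA_eq_runB (cs : List Char) (pos : Int) :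
    pvGoA cs pos = pvRunB cs pos none [] := by
  induction hn : cs.length using Nat.strong_induction_on generalizing cs pos with
  | _ n ih =>
    cases cs with
    | nil => simp [pvGoA, pvRunB]
    | cons c rest =>
      by_cases h : PySem.Chars.isalnum c = true
      · have hr : pvRunB (c :: rest) pos none [] = pvRunB rest (pos + 1) (some pos) [] := by
          simp [pvRunB, h]
        simp only [pvGoA, h, ite_true]
        rw [hr, pvRunB_some]
        have hlt : (pvConsumeA rest (pos + 1)).2.length < n := by
          have := pvConsumeA_length rest (pos + 1)
          simp only [List.length_cons] at hn
          omega
        rw [ih _ hlt _ _ rfl]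
      · simp only [pvGoA, pvRunB, h, Bool.false_eq_true, ite_false]
        refine ih rest.length ?_ _ _ rfl
        simp only [List.length_cons] at hn
        omega

-- ===== VERDICT (by name: the statement is the Claim_ definition above) =====
theorem iter_words_py_spec : Claim_equal_iter_words_py := by
  intro line _
  unfold Spec_iter_words_py iter_words_py iter_words_py_alt
  rw [pvGoA_eq_runB, pvRunB_eq_fold]
  rcases hE : (PySem.List.enumerate line.toList 0).foldl pvStepB ([], none) with ⟨a, st⟩
  simp only [hE]
  cases st <;> simp
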